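-- pv_equiv track=rewrite | github.com/m3wt/viable-ui | src/main/python/serial_assignment.py | get_svalboard_cluster_order
-- ===== SOURCE A (Python) =====
-- SVALBOARD_CLUSTER_DIRECTION_ORDER = [3, 1, 0, 4, 2, 5]
--
-- SVALBOARD_CLUSTER_ROW_ORDER = [4, 3, 2, 1, 0, 6, 7, 8, 9, 5]
--
-- def get_svalboard_cluster_order(existing_keymap_ids):
--     """Generate cluster order based on which keys actually exist.
--
--     Args:
--         existing_keymap_ids: set of keymap IDs that exist in the layout
--
--     Returns:
--         List of keymap IDs in cluster order (only includes existing keys)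
--     """
--     result = []
--     for row in SVALBOARD_CLUSTER_ROW_ORDER:
--         for col in SVALBOARD_CLUSTER_DIRECTION_ORDER:
--             keymap_id = row * 6 + col
--             if keymap_id in existing_keymap_ids:
--                 result.append(keymap_id)
--     return result
-- ===== SOURCE B (Python) =====
-- SVALBOARD_CLUSTER_DIRECTION_ORDER = [3, 1, 0, 4, 2, 5]
--
-- SVALBOARD_CLUSTER_ROW_ORDER = [4, 3, 2, 1, 0, 6, 7, 8, 9, 5]
--
-- # Rank of each valid keymap id: its 0-based position in the fixed
-- # row-major (ROW_ORDER x DIRECTION_ORDER) enumeration.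
-- _RANK = {row * 6 + col: i
--          for i, (row, col) in enumerate(
--              (r, c)
--              for r in SVALBOARD_CLUSTER_ROW_ORDER
--              for c in SVALBOARD_CLUSTER_DIRECTION_ORDER)}
--
--
-- def get_svalboard_cluster_order(existing_keymap_ids):
--     present = {kid for kid in existing_keymap_ids if kid in _RANK}
--     return sorted(present, key=_RANK.__getitem__)
-- ===== Notes on version B (the rewrite author's own statement) =====
-- stated objective: alternative
-- what changed: A scans the fixed 60-slot row/direction enumeration testing each slot for membership in the input; B precomputes a rank dict over the valid ids once, filters the deduplicated input ids by it, and sorts them by rank.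
import Mathlib
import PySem

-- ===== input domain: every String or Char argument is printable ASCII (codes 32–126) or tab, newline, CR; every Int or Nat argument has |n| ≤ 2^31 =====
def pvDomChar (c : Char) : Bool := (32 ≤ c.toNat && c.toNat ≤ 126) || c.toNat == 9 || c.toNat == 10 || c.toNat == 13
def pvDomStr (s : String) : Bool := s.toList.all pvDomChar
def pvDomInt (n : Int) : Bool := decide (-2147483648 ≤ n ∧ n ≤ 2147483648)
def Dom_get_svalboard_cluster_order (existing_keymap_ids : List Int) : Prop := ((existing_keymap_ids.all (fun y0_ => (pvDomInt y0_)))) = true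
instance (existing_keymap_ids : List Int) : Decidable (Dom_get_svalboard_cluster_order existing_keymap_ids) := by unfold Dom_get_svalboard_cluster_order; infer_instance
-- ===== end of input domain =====

-- B inverts A's traversal: instead of scanning all 60 fixed slots testing membership,
-- it ranks the valid ids once and sorts the (deduplicated) input ids by that rank (objective: alternative).

-- ===== PORT A =====
def SVALBOARD_CLUSTER_DIRECTION_ORDER : List Int := [3, 1, 0, 4, 2, 5]

def SVALBOARD_CLUSTER_ROW_ORDER : List Int := [4, 3, 2, 1, 0, 6, 7, 8, 9, 5]

def get_svalboard_cluster_order (existing_keymap_ids : List Int) : List Int :=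
  SVALBOARD_CLUSTER_ROW_ORDER.foldl (fun result row =>
    SVALBOARD_CLUSTER_DIRECTION_ORDER.foldl (fun result col =>
      let keymap_id := row * 6 + col
      if existing_keymap_ids.contains keymap_id then result ++ [keymap_id] else result)
      result) []

-- ===== PORT B =====
-- the nested generator (r, c) for r in ROW_ORDER for c in DIRECTION_ORDER, mapped to keymap ids
def pvRankKeys : List Int :=
  SVALBOARD_CLUSTER_ROW_ORDER.flatMap (fun row =>
    SVALBOARD_CLUSTER_DIRECTION_ORDER.map (fun col => row * 6 + col))

-- _RANK: keymap_id -> its 0-based position in the enumeration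
def pvRank : PySem.Dict Int Int :=
  (PySem.List.enumerate pvRankKeys 0).foldl (fun d p => d.insert p.2 p.1) PySem.Dict.empty

def get_svalboard_cluster_order_alt (existing_keymap_ids : List Int) : List Int :=
  let present : PySem.Set Int :=
    PySem.Set.ofList (existing_keymap_ids.filter (fun kid => pvRank.contains kid))
  -- _RANK.__getitem__ never raises here since present only holds keys of _RANK; getD 0 is exact
  PySem.List.sorted present (fun kid => pvRank.getD kid 0) false

-- ===== PRECONDITION & SPEC =====
def Spec_get_svalboard_cluster_order (existing_keymap_ids : List Int) (out : List Int) : Prop := out = get_svalboard_cluster_order_alt existing_keymap_ids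
instance (existing_keymap_ids : List Int) (out : List Int) : Decidable (Spec_get_svalboard_cluster_order existing_keymap_ids out) := by unfold Spec_get_svalboard_cluster_order; infer_instance

-- ===== CLAIM (what is proved, stated in full; the proofs are below) =====
def Claim_equal_get_svalboard_cluster_order : Prop := ∀ (existing_keymap_ids : List Int), Dom_get_svalboard_cluster_order existing_keymap_ids → Spec_get_svalboard_cluster_order existing_keymap_ids (get_svalboard_cluster_order existing_keymap_ids)

-- ===== LEMMAS AND PROOFS =====

-- the common reference value: the fixed enumeration filtered by membership in the input
def pvTarget (ids : List Int) : List Int := pvRankKeys.filter (fun k => ids.contains k)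

theorem pvA_eq_target (ids : List Int) : get_svalboard_cluster_order ids = pvTarget ids := by
  have hin : ∀ (acc : List Int) (row : Int),
      SVALBOARD_CLUSTER_DIRECTION_ORDER.foldl (fun result col =>
          let keymap_id := row * 6 + col
          if ids.contains keymap_id then result ++ [keymap_id] else result) acc
        = acc ++ (SVALBOARD_CLUSTER_DIRECTION_ORDER.map (fun col => row * 6 + col)).filter
            (fun k => ids.contains k) := by
    intro acc row
    show SVALBOARD_CLUSTER_DIRECTION_ORDER.foldl (fun result col =>
        if ids.contains (row * 6 + col) then result ++ [row * 6 + col] else result) acc = _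
    rw [PySem.List.foldl_append_if (p := fun col => ids.contains (row * 6 + col))
      (f := fun col => row * 6 + col)]
    rw [List.filter_map]
    rfl
  unfold get_svalboard_cluster_order pvTarget pvRankKeys
  rw [PySem.List.foldl_congr_mem _ _
    (fun res row => res ++ ((SVALBOARD_CLUSTER_DIRECTION_ORDER.map (fun col => row * 6 + col)).filter
      (fun k => ids.contains k))) _ (fun acc row _ => hin acc row)]
  rw [PySem.List.foldl_append_eq_flatMap, List.filter_flatMap]
  simp

set_option maxRecDepth 8192 in
theorem pvKeys_rank : pvRank.keys = pvRankKeys := by decide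

set_option maxRecDepth 8192 in
theorem pvNodup_keys : pvRankKeys.Nodup := by decide

set_option maxRecDepth 8192 in
theorem pvPairwise_target (ids : List Int) :
    (pvTarget ids).Pairwise (fun a b => pvRank.getD a 0 < pvRank.getD b 0) := by
  apply List.Pairwise.filter
  rw [← List.pairwise_map (f := fun k => pvRank.getD k 0)]
  decide

theorem pvB_eq_target (ids : List Int) : get_svalboard_cluster_order_alt ids = pvTarget ids := by
  unfold get_svalboard_cluster_order_alt
  refine PySem.List.sorted_eq_of_perm_of_pairwise_lt _ _ _ ?_ (pvPairwise_target ids)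
  unfold pvTarget
  rw [List.perm_ext_iff_of_nodup
    ((pvNodup_keys).filter _) (PySem.Set.nodup_ofList _)]
  intro k
  simp only [List.mem_filter, PySem.Set.mem_ofList]
  constructor
  · rintro ⟨hk, hc⟩
    exact ⟨by simpa using hc, by
      simpa [PySem.Dict.contains_iff_mem_keys, pvKeys_rank] using hk⟩
  · rintro ⟨hc, hk⟩
    refine ⟨?_, by simpa using hc⟩
    simpa [PySem.Dict.contains_iff_mem_keys, pvKeys_rank] using hk

-- ===== VERDICT (by name: the statement is the Claim_ definition above) =====
theorem get_svalboard_cluster_order_spec : Claim_equal_get_svalboard_cluster_order := by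
  intro ids _
  unfold Spec_get_svalboard_cluster_order
  rw [pvA_eq_target, pvB_eq_target]
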